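-- pv_equiv track=rewrite | github.com/sm970309/Algorithm-Problem | greedy/3_문자열 뒤집기.py | make_0
-- ===== SOURCE A (Python) =====
-- def make_0(s):
--     count = 0
--     if s[0] == "1":
--         count += 1
--     for i in range(len(s)-1):
--         if s[i]=="0" and s[i+1]=="1":
--             count += 1
--     return count
-- ===== SOURCE B (Python) =====
-- def make_0(s):
--     return sum(1 for piece in s.split("0") if piece.startswith("1"))
-- ===== Notes on version B (the rewrite author's own statement) =====
-- stated objective: alternative
-- what changed: Instead of scanning indices for 0-to-1 transitions, B splits the string on '0' and counts the resulting pieces that start with '1' (a run of 1s begins exactly at the string start or right after a '0').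
import Mathlib
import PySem

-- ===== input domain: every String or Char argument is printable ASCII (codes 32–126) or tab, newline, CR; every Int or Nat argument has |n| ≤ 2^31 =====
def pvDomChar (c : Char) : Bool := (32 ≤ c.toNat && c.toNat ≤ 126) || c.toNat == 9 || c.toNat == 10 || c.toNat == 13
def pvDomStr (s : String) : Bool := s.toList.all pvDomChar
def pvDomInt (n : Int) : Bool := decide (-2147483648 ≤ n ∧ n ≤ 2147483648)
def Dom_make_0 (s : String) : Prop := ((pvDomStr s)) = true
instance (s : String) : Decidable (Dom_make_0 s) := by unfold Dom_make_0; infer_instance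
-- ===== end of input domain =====

-- B replaces A's index scan with a staged algorithm: split the string on '0' and count pieces starting with '1' (alternative decomposition).


-- ===== PORT A =====
def make_0 (s : String) : Int :=
  let count : Int := 0
  let count := if PySem.Str.pyGet? s 0 = some '1' then count + 1 else count
  (PySem.List.pyRange 0 (PySem.Str.len s - 1) 1).foldl
    (fun acc i =>
      if PySem.Str.pyGet? s i = some '0' ∧ PySem.Str.pyGet? s (i + 1) = some '1' then acc + 1
      else acc) count

-- ===== PORT B =====
-- s.split("0") with the nonempty separator "0" is PySem.Chars.splitOn on the code points;
-- the generator-sum of 1 over the pieces that start with "1" is countP.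
def make_0_alt (s : String) : Int :=
  (((PySem.Chars.splitOn s.toList ['0']).countP
      (fun piece => PySem.Chars.startswith piece ['1'])) : Int)

-- ===== PRECONDITION & SPEC =====
-- Pre_ excludes only the empty string, on which A raises IndexError at s[0].
def Pre_make_0 (s : String) : Prop := s ≠ ""
instance (s : String) : Decidable (Pre_make_0 s) := by unfold Pre_make_0; infer_instance
def pvWitness_make_0 : String := "0110"

def Spec_make_0 (s : String) (out : Int) : Prop := out = make_0_alt s
instance (s : String) (out : Int) : Decidable (Spec_make_0 s out) := by unfold Spec_make_0; infer_instance

-- ===== CLAIM (what is proved, stated in full; the proofs are below) =====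
def Claim_equal_make_0 : Prop := ∀ (s : String), Dom_make_0 s → Pre_make_0 s → Spec_make_0 s (make_0 s)

-- ===== LEMMAS AND PROOFS =====

/-- number of adjacent '0','1' pairs -/
def pvPc : List Char → Nat
  | a :: b :: t => (if a = '0' ∧ b = '1' then 1 else 0) + pvPc (b :: t)
  | _ => 0

/-- structural reference version of split-on-'0' -/
def pvSp : List Char → List (List Char)
  | [] => [[]]
  | c :: t =>
    if c = '0' then [] :: pvSp t
    else match pvSp t with
      | p :: r => (c :: p) :: r
      | [] => [[c]]

theorem pvSp_ne_nil (t : List Char) : pvSp t ≠ [] := by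
  cases t with
  | nil => simp [pvSp]
  | cons c t' =>
    simp only [pvSp]
    split_ifs
    · simp
    · cases h : pvSp t' <;> simp

theorem pvGoEq (fuel : Nat) (l cur : List Char) (acc : List (List Char))
    (h : l.length ≤ fuel) :
    PySem.Chars.splitOn.go ['0'] fuel l cur acc =
      acc.reverse ++ (match pvSp l with
        | p :: r => (cur.reverse ++ p) :: r
        | [] => []) := by
  induction fuel generalizing l cur acc with
  | zero =>
    have hl : l = [] := List.eq_nil_of_length_eq_zero (Nat.le_zero.mp h)
    subst hl
    simp [PySem.Chars.splitOn.go, pvSp]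
  | succ fuel ih =>
    cases l with
    | nil => simp [PySem.Chars.splitOn.go, pvSp]
    | cons c rest =>
      rw [PySem.Chars.splitOn.go]
      by_cases hc : c = '0'
      · have hpre : List.isPrefixOf ['0'] (c :: rest) = true := by
          simp [List.isPrefixOf, hc]
        rw [if_pos hpre]
        have hdrop : List.drop (['0'] : List Char).length (c :: rest) = rest := rfl
        rw [hdrop, ih rest [] (cur.reverse :: acc) (by simp at h ⊢; omega)]
        simp only [pvSp, hc]
        cases hs : pvSp rest with
        | nil => exact absurd hs (pvSp_ne_nil rest)
        | cons p r => simp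
      · have hpre : List.isPrefixOf ['0'] (c :: rest) = false := by
          simp [List.isPrefixOf]
          exact fun hx => hc hx.symm
        rw [if_neg (by simp [hpre])]
        rw [ih rest (c :: cur) acc (by simp at h ⊢; omega)]
        simp only [pvSp, hc]
        cases hs : pvSp rest with
        | nil => exact absurd hs (pvSp_ne_nil rest)
        | cons p r => simp

theorem pvSplitOn0 (cs : List Char) : PySem.Chars.splitOn cs ['0'] = pvSp cs := by
  unfold PySem.Chars.splitOn
  rw [pvGoEq (cs.length + 1) cs [] [] (by omega)]
  cases hs : pvSp cs with
  | nil => exact absurd hs (pvSp_ne_nil cs)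
  | cons p r => simp

theorem pvSw (p : List Char) :
    PySem.Chars.startswith p ['1'] = decide (p.head? = some '1') := by
  by_cases h : ('1' :: []) <+: p
  · rw [(PySem.Chars.startswith_iff p ['1']).mpr h]
    obtain ⟨t, ht⟩ := h
    subst ht
    simp
  · have hf : PySem.Chars.startswith p ['1'] = false := by
      by_contra hb
      exact h ((PySem.Chars.startswith_iff p ['1']).mp (by
        revert hb; cases PySem.Chars.startswith p ['1'] <;> simp))
    rw [hf]
    cases p with
    | nil => simp
    | cons a t =>
      have : a ≠ '1' := by
        intro ha; subst ha; exact h ⟨t, rfl⟩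
      simp [this]

theorem pvSpHead (t p : List Char) (r : List (List Char)) (h : pvSp t = p :: r) :
    (p.head? = some '1') ↔ (t.head? = some '1') := by
  cases t with
  | nil =>
    simp [pvSp] at h
    simp [h.1.symm]
  | cons c t' =>
    by_cases hc : c = '0'
    · simp only [pvSp, if_pos hc] at h
      have hp : p = [] := by exact (List.cons.injEq _ _ _ _ ▸ h).1.symm
      subst hp hc
      simp
    · simp only [pvSp, if_neg hc] at h
      cases hs : pvSp t' with
      | nil => exact absurd hs (pvSp_ne_nil t')
      | cons q r' =>
        rw [hs] at h
        have hp : p = c :: q := (List.cons.injEq _ _ _ _ ▸ h).1.symm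
        subst hp
        simp

theorem pvCnt (cs : List Char) :
    (pvSp cs).countP (fun p => decide (p.head? = some '1')) =
      (if cs.head? = some '1' then 1 else 0) + pvPc cs := by
  induction cs with
  | nil => simp [pvSp, pvPc]
  | cons c t ih =>
    by_cases hc : c = '0'
    · simp only [pvSp, if_pos hc, List.countP_cons]
      rw [ih]
      subst hc
      have hpc : pvPc ('0' :: t) = (if t.head? = some '1' then 1 else 0) + pvPc t := by
        cases t with
        | nil => simp [pvPc]
        | cons b t' =>
          simp only [pvPc, List.head?]
          by_cases hb : b = '1' <;> simp [hb]
      simp [hpc]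
    · simp only [pvSp, if_neg hc]
      cases hs : pvSp t with
      | nil => exact absurd hs (pvSp_ne_nil t)
      | cons q r =>
        rw [hs] at ih
        rw [List.countP_cons] at ih
        rw [List.countP_cons]
        have hq : (q.head? = some '1') ↔ (t.head? = some '1') := pvSpHead t q r hs
        have hq' : decide (q.head? = some '1') = decide (t.head? = some '1') :=
          decide_eq_decide.mpr hq
        rw [hq'] at ih
        have hpc : pvPc (c :: t) = pvPc t := by
          cases t with
          | nil => simp [pvPc]
          | cons b t' => simp [pvPc, hc]
        rw [hpc]
        simp only [List.head?_cons, Option.some.injEq]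
        by_cases ht : t.head? = some '1' <;> by_cases h1 : c = '1' <;>
          simp only [ht, h1, decide_true, decide_false, if_true, if_false,
            Bool.false_eq_true] at ih ⊢ <;>
          omega

/-- the Nat-indexed transition count over List.range equals pvPc -/
theorem pvCountRange (cs : List Char) :
    (List.range (cs.length - 1)).countP
      (fun k => decide (cs[k]? = some '0' ∧ cs[k + 1]? = some '1')) = pvPc cs := by
  induction cs with
  | nil => simp [pvPc]
  | cons a t ih =>
    cases t with
    | nil => simp [pvPc]
    | cons b t' =>
      have hlen : (a :: b :: t').length - 1 = t'.length + 1 := by simp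
      rw [hlen, List.range_succ_eq_map, List.countP_cons, List.countP_map]
      have hshift :
          (List.range t'.length).countP
            ((fun k => decide ((a :: b :: t')[k]? = some '0' ∧ (a :: b :: t')[k + 1]? = some '1'))
              ∘ Nat.succ) =
          (List.range ((b :: t').length - 1)).countP
            (fun k => decide ((b :: t')[k]? = some '0' ∧ (b :: t')[k + 1]? = some '1')) := by
        have hl2 : (b :: t').length - 1 = t'.length := by simp
        rw [hl2]
        apply List.countP_congr
        intro k _
        simp [Function.comp]
      rw [hshift, ih]
      simp only [pvPc]
      by_cases hab : a = '0' ∧ b = '1' <;> simp [hab, Nat.add_comm]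

/-- A's index loop computes pvPc, stated on the underlying char list. -/
theorem pvLoop (cs : List Char) (c : Int) :
    (PySem.List.pyRange 0 ((cs.length : Int) - 1) 1).foldl
      (fun acc i =>
        if PySem.List.pyGet? cs i = some '0' ∧ PySem.List.pyGet? cs (i + 1) = some '1' then acc + 1
        else acc) c = c + (pvPc cs : Int) := by
  rw [PySem.List.foldl_ite_add_one]
  congr 1
  rw [PySem.List.pyRange_one, List.countP_map]
  have hcong :
      (List.range (((cs.length : Int) - 1 - 0).toNat)).countP
        ((fun i => decide (PySem.List.pyGet? cs i = some '0' ∧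
            PySem.List.pyGet? cs (i + 1) = some '1')) ∘ (fun k : Nat => (0 : Int) + k)) =
      (List.range (cs.length - 1)).countP
        (fun k => decide (cs[k]? = some '0' ∧ cs[k + 1]? = some '1')) := by
    have hl : (((cs.length : Int) - 1 - 0).toNat) = cs.length - 1 := by omega
    rw [hl]
    apply List.countP_congr
    intro k _
    simp only [Function.comp, decide_eq_true_eq]
    have e1 : ((0 : Int) + (k : Int)) = ((k : Nat) : Int) := by omega
    have e2 : ((0 : Int) + (k : Int) + 1) = ((k + 1 : Nat) : Int) := by push_cast; ring
    rw [e2, e1, PySem.List.pyGet?_natCast, PySem.List.pyGet?_natCast]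
  rw [hcong, pvCountRange]

theorem pvHeadIf (cs : List Char) (h : cs ≠ []) :
    (if PySem.List.pyGet? cs 0 = some '1' then (0 : Int) + 1 else 0) =
    (if cs.head? = some '1' then (1 : Int) else 0) := by
  cases cs with
  | nil => exact absurd rfl h
  | cons a t =>
    have h0 : PySem.List.pyGet? (a :: t) (0 : Int) = some a := by
      have : ((0 : Nat) : Int) = (0 : Int) := rfl
      rw [← this, PySem.List.pyGet?_natCast]; rfl
    rw [h0]
    by_cases ha : a = '1' <;> simp [ha]

/-- the whole goal of make_0_spec, stated on the underlying char list -/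
theorem pvMain (cs : List Char) (h : cs ≠ []) :
    (PySem.List.pyRange 0 ((cs.length : Int) - 1) 1).foldl
      (fun acc i =>
        if PySem.List.pyGet? cs i = some '0' ∧ PySem.List.pyGet? cs (i + 1) = some '1' then acc + 1
        else acc)
      (if PySem.List.pyGet? cs 0 = some '1' then (0 : Int) + 1 else 0) =
    (((PySem.Chars.splitOn cs ['0']).countP
        (fun piece => PySem.Chars.startswith piece ['1'])) : Int) := by
  rw [pvLoop, pvHeadIf cs h, pvSplitOn0]
  have hcp : (pvSp cs).countP (fun piece => PySem.Chars.startswith piece ['1']) =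
      (pvSp cs).countP (fun p => decide (p.head? = some '1')) := by
    apply List.countP_congr
    intro p _
    rw [pvSw]
  rw [hcp, pvCnt]
  push_cast
  by_cases h1 : cs.head? = some '1' <;> simp [h1]

-- ===== VERDICT (by name: the statement is the Claim_ definition above) =====
theorem make_0_spec : Claim_equal_make_0 := by
  intro s _ hpre
  unfold Spec_make_0 make_0 make_0_alt
  have hne : s.toList ≠ [] := by
    intro h
    exact hpre (by rwa [String.toList_eq_nil_iff] at h)
  simp only [PySem.Str.len_eq, PySem.Str.pyGet?_eq, PySem.Chars.pyGet?_eq_listPyGet?]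
  exact pvMain s.toList hne
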